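-- pv_equiv track=rewrite | github.com/Shiinoqt/ExerciseITS | src/ex/lez20/cd/test.py | symdiff_sorted
-- ===== SOURCE A (Python) =====
-- def symdiff_sorted(a: list[int], b: list[int]) -> list[int]:
--     result = []
--
--     # Elements in a but not in b
--     for n in a:
--         if n not in b:
--             result.append(n)
--
--     # Elements in b but not in a
--     for n in b:
--         if n not in a:
--             result.append(n)
--
--     return sorted(list(set(result)))  # Remove duplicates and sort
-- ===== SOURCE B (Python) =====
-- def symdiff_sorted(a: list[int], b: list[int]) -> list[int]:
--     sa = sorted(set(a))
--     sb = sorted(set(b))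
--     out = []
--     i = j = 0
--     while i < len(sa) and j < len(sb):
--         x, y = sa[i], sb[j]
--         if x == y:
--             i += 1
--             j += 1
--         elif x < y:
--             out.append(x)
--             i += 1
--         else:
--             out.append(y)
--             j += 1
--     out.extend(sa[i:])
--     out.extend(sb[j:])
--     return out
-- ===== Notes on version B (the rewrite author's own statement) =====
-- stated objective: faster
-- what changed: Replaces the per-element membership scans over the other list with sorting each deduplicated list once and a two-pointer merge that skips common values.
import Mathlib
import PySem

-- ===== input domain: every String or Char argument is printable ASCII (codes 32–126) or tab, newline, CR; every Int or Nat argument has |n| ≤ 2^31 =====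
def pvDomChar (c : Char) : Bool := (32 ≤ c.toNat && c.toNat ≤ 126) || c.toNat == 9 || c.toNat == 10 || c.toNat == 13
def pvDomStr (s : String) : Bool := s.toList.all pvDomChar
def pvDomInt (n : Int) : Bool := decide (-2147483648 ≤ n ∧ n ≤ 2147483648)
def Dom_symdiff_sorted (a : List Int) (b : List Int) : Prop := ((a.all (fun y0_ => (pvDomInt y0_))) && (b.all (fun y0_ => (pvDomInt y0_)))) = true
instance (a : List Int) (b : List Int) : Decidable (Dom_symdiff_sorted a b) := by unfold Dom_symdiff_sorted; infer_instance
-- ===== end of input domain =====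

-- B replaces A's quadratic membership scans by sorting each deduplicated list and merging with two pointers (faster).

-- ===== PORT A =====
def symdiff_sorted (a : List Int) (b : List Int) : List Int :=
  let result := a.foldl (fun acc n => if n ∈ b then acc else acc ++ [n]) []
  let result := b.foldl (fun acc n => if n ∈ a then acc else acc ++ [n]) result
  PySem.List.sorted (PySem.Set.ofList result) (fun x => x) false

-- ===== PORT B =====
-- the two-pointer while loop of Source B, as structural recursion over the two suffixes
def symdiffMerge : List Int → List Int → List Int
  | [], ys => ys
  | x :: xs, [] => x :: xs
  | x :: xs, y :: ys =>
    if x = y then symdiffMerge xs ys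
    else if x < y then x :: symdiffMerge xs (y :: ys)
    else y :: symdiffMerge (x :: xs) ys
termination_by xs ys => xs.length + ys.length

def symdiff_sorted_alt (a : List Int) (b : List Int) : List Int :=
  let sa := PySem.List.sorted (PySem.Set.ofList a) (fun x => x) false
  let sb := PySem.List.sorted (PySem.Set.ofList b) (fun x => x) false
  symdiffMerge sa sb

-- ===== PRECONDITION & SPEC =====
def Spec_symdiff_sorted (a : List Int) (b : List Int) (out : List Int) : Prop := out = symdiff_sorted_alt a b
instance (a : List Int) (b : List Int) (out : List Int) : Decidable (Spec_symdiff_sorted a b out) := by unfold Spec_symdiff_sorted; infer_instance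

-- ===== CLAIM (what is proved, stated in full; the proofs are below) =====
def Claim_equal_symdiff_sorted : Prop := ∀ (a : List Int) (b : List Int), Dom_symdiff_sorted a b → Spec_symdiff_sorted a b (symdiff_sorted a b)

-- ===== LEMMAS AND PROOFS =====

-- A's loops: appending exactly the elements not in c (specific ite shape of A's branches)
theorem foldl_skip_mem (c : List Int) : ∀ (l acc : List Int),
    l.foldl (fun acc n => if n ∈ c then acc else acc ++ [n]) acc
      = acc ++ l.filter (fun n => decide (n ∉ c))
  | [], acc => by simp
  | x :: t, acc => by
    by_cases h : x ∈ c <;>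
      simp [List.foldl_cons, h, foldl_skip_mem c t]

-- membership in a merge is bounded by membership in the arguments (no sortedness needed)
theorem mem_symdiffMerge_sub {z : Int} : ∀ {xs ys : List Int}, z ∈ symdiffMerge xs ys → z ∈ xs ∨ z ∈ ys
  | [], ys, h => Or.inr (by simpa [symdiffMerge] using h)
  | x :: xs, [], h => Or.inl (by simpa [symdiffMerge] using h)
  | x :: xs, y :: ys, h => by
    simp only [symdiffMerge] at h
    split_ifs at h with h1 h2
    · rcases mem_symdiffMerge_sub h with h' | h'
      · exact Or.inl (List.mem_cons_of_mem _ h')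
      · exact Or.inr (List.mem_cons_of_mem _ h')
    · rcases List.mem_cons.1 h with rfl | h'
      · exact Or.inl (List.mem_cons_self)
      · rcases mem_symdiffMerge_sub h' with h'' | h''
        · exact Or.inl (List.mem_cons_of_mem _ h'')
        · exact Or.inr h''
    · rcases List.mem_cons.1 h with rfl | h'
      · exact Or.inr (List.mem_cons_self)
      · rcases mem_symdiffMerge_sub h' with h'' | h''
        · exact Or.inl h''
        · exact Or.inr (List.mem_cons_of_mem _ h'')
termination_by xs ys => xs.length + ys.length

-- merging two strictly increasing lists yields a strictly increasing list
theorem pairwise_symdiffMerge : ∀ {xs ys : List Int}, xs.Pairwise (· < ·) → ys.Pairwise (· < ·) →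
    (symdiffMerge xs ys).Pairwise (· < ·)
  | [], ys, _, hy => by simpa [symdiffMerge] using hy
  | x :: xs, [], hx, _ => by simpa [symdiffMerge] using hx
  | x :: xs, y :: ys, hx, hy => by
    rcases List.pairwise_cons.1 hx with ⟨hxlt, hxs⟩
    rcases List.pairwise_cons.1 hy with ⟨hylt, hys⟩
    simp only [symdiffMerge]
    split_ifs with h1 h2
    · exact pairwise_symdiffMerge hxs hys
    · refine List.pairwise_cons.2 ⟨fun z hz => ?_, pairwise_symdiffMerge hxs hy⟩
      rcases mem_symdiffMerge_sub hz with h' | h'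
      · exact hxlt z h'
      · rcases List.mem_cons.1 h' with rfl | h''
        · exact h2
        · exact h2.trans (hylt z h'')
    · have hyx : y < x := by omega
      refine List.pairwise_cons.2 ⟨fun z hz => ?_, pairwise_symdiffMerge hx hys⟩
      rcases mem_symdiffMerge_sub hz with h' | h'
      · rcases List.mem_cons.1 h' with rfl | h''
        · exact hyx
        · exact hyx.trans (hxlt z h'')
      · exact hylt z h'
termination_by xs ys => xs.length + ys.length

-- membership in the merge of two strictly increasing lists = symmetric difference
theorem mem_symdiffMerge {z : Int} : ∀ {xs ys : List Int}, xs.Pairwise (· < ·) → ys.Pairwise (· < ·) →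
    (z ∈ symdiffMerge xs ys ↔ (z ∈ xs ∧ z ∉ ys) ∨ (z ∈ ys ∧ z ∉ xs))
  | [], ys, _, _ => by simp [symdiffMerge]
  | x :: xs, [], _, _ => by simp [symdiffMerge]
  | x :: xs, y :: ys, hx, hy => by
    rcases List.pairwise_cons.1 hx with ⟨hxlt, hxs⟩
    rcases List.pairwise_cons.1 hy with ⟨hylt, hys⟩
    simp only [symdiffMerge]
    split_ifs with h1 h2
    · subst h1
      rw [mem_symdiffMerge hxs hys]
      constructor
      · rintro (⟨hz1, hz2⟩ | ⟨hz1, hz2⟩)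
        · exact Or.inl ⟨List.mem_cons_of_mem _ hz1,
            fun h => (List.mem_cons.1 h).elim (fun he => absurd (he ▸ hxlt z hz1) (lt_irrefl z)) hz2⟩
        · exact Or.inr ⟨List.mem_cons_of_mem _ hz1,
            fun h => (List.mem_cons.1 h).elim (fun he => absurd (he ▸ hylt z hz1) (lt_irrefl z)) hz2⟩
      · rintro (⟨hz1, hz2⟩ | ⟨hz1, hz2⟩)
        · rcases List.mem_cons.1 hz1 with rfl | hz1'
          · exact absurd List.mem_cons_self hz2
          · exact Or.inl ⟨hz1', fun h => hz2 (List.mem_cons_of_mem _ h)⟩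
        · rcases List.mem_cons.1 hz1 with rfl | hz1'
          · exact absurd List.mem_cons_self hz2
          · exact Or.inr ⟨hz1', fun h => hz2 (List.mem_cons_of_mem _ h)⟩
    · -- x < y : x goes to the output
      have hxny : ∀ w ∈ y :: ys, x < w := by
        intro w hw
        rcases List.mem_cons.1 hw with rfl | hw'
        · exact h2
        · exact h2.trans (hylt w hw')
      rw [List.mem_cons, mem_symdiffMerge hxs hy]
      constructor
      · rintro (rfl | ⟨hz1, hz2⟩ | ⟨hz1, hz2⟩)
        · exact Or.inl ⟨List.mem_cons_self, fun h => absurd (hxny z h) (lt_irrefl z)⟩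
        · exact Or.inl ⟨List.mem_cons_of_mem _ hz1, hz2⟩
        · exact Or.inr ⟨hz1, fun h =>
            (List.mem_cons.1 h).elim (fun he => absurd (he ▸ hxny z hz1) (lt_irrefl z))
              (fun h' => hz2 h')⟩
      · rintro (⟨hz1, hz2⟩ | ⟨hz1, hz2⟩)
        · rcases List.mem_cons.1 hz1 with rfl | hz1'
          · exact Or.inl rfl
          · exact Or.inr (Or.inl ⟨hz1', hz2⟩)
        · refine Or.inr (Or.inr ⟨hz1, fun h => hz2 (List.mem_cons_of_mem _ h)⟩)
    · -- y < x : y goes to the output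
      have hyx : y < x := by omega
      have hynx : ∀ w ∈ x :: xs, y < w := by
        intro w hw
        rcases List.mem_cons.1 hw with rfl | hw'
        · exact hyx
        · exact hyx.trans (hxlt w hw')
      rw [List.mem_cons, mem_symdiffMerge hx hys]
      constructor
      · rintro (rfl | ⟨hz1, hz2⟩ | ⟨hz1, hz2⟩)
        · exact Or.inr ⟨List.mem_cons_self, fun h => absurd (hynx z h) (lt_irrefl z)⟩
        · exact Or.inl ⟨hz1, fun h =>
            (List.mem_cons.1 h).elim (fun he => absurd (he ▸ hynx z hz1) (lt_irrefl z))
              (fun h' => hz2 h')⟩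
        · exact Or.inr ⟨List.mem_cons_of_mem _ hz1, hz2⟩
      · rintro (⟨hz1, hz2⟩ | ⟨hz1, hz2⟩)
        · exact Or.inr (Or.inl ⟨hz1, fun h => hz2 (List.mem_cons_of_mem _ h)⟩)
        · rcases List.mem_cons.1 hz1 with rfl | hz1'
          · exact Or.inl rfl
          · exact Or.inr (Or.inr ⟨hz1', hz2⟩)
termination_by xs ys => xs.length + ys.length

-- ===== VERDICT (by name: the statement is the Claim_ definition above) =====
theorem symdiff_sorted_spec : Claim_equal_symdiff_sorted := by
  intro a b _
  unfold Spec_symdiff_sorted symdiff_sorted symdiff_sorted_alt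
  dsimp only
  have hpa : (PySem.List.sorted (PySem.Set.ofList a) (fun x => x) false).Pairwise (· < ·) :=
    PySem.List.sorted_ofList_pairwise_lt a
  have hpb : (PySem.List.sorted (PySem.Set.ofList b) (fun x => x) false).Pairwise (· < ·) :=
    PySem.List.sorted_ofList_pairwise_lt b
  -- A's accumulated result is the concatenation of the two filters
  rw [foldl_skip_mem, foldl_skip_mem]
  apply PySem.List.sorted_eq_of_perm_of_pairwise_lt
  case hs => exact pairwise_symdiffMerge hpa hpb
  · -- permutation: both sides are nodup with the same members
    refine (List.perm_ext_iff_of_nodup ?_ ?_).2 ?_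
    · exact (pairwise_symdiffMerge hpa hpb).imp ne_of_lt
    · exact PySem.Set.nodup_ofList _
    · intro z
      rw [mem_symdiffMerge hpa hpb, PySem.Set.mem_ofList]
      simp only [List.nil_append, List.mem_append, List.mem_filter, decide_not,
        Bool.not_eq_eq_eq_not, Bool.not_true, decide_eq_false_iff_not,
        PySem.List.mem_sorted, PySem.Set.mem_ofList]
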